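-- pv_equiv track=rewrite | github.com/cvooster/advent-of-code | advent_of_code/year_2016/day_01/solution.py | get_new_visited
-- ===== SOURCE A (Python) =====
-- def get_new_visited(x, y, direction, move_size):
--     """Get `move_size` locations on the way to x, y, walking in the given direction."""
--     if direction == 0:
--         return [(x, y_) for y_ in range(y, y - move_size, -1)]
--     elif direction == 1:
--         return [(x_, y) for x_ in range(x, x - move_size, -1)]
--     elif direction == 2:
--         return [(x, y_) for y_ in range(y, y + move_size)]
--     elif direction == 3:
--         return [(x_, y) for x_ in range(x, x + move_size)]
-- ===== SOURCE B (Python) =====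
-- def _step(px, py, direction):
--     """One unit move from (px, py) in the given direction."""
--     if direction == 0:
--         return px, py - 1
--     if direction == 1:
--         return px - 1, py
--     if direction == 2:
--         return px, py + 1
--     return px + 1, py
--
--
-- def get_new_visited(x, y, direction, move_size):
--     """Get `move_size` locations on the way to x, y, walking in the given direction."""
--     if direction not in (0, 1, 2, 3):
--         return None
--     path = []
--     px, py = x, y
--     remaining = move_size
--     while remaining > 0:
--         path.append((px, py))
--         px, py = _step(px, py, direction)
--         remaining -= 1
--     return path
-- ===== Notes on version B (the rewrite author's own statement) =====
-- stated objective: alternative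
-- what changed: A computes each point independently from four per-direction coordinate-range comprehensions; B walks the path with a single while loop maintaining a current point, appending it and stepping to its one-unit successor, so every point is derived from the previous one.
-- outside the precondition, e.g. on get_new_visited(0, 0, 4, 3): A returns None, B returns None
import Mathlib
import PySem

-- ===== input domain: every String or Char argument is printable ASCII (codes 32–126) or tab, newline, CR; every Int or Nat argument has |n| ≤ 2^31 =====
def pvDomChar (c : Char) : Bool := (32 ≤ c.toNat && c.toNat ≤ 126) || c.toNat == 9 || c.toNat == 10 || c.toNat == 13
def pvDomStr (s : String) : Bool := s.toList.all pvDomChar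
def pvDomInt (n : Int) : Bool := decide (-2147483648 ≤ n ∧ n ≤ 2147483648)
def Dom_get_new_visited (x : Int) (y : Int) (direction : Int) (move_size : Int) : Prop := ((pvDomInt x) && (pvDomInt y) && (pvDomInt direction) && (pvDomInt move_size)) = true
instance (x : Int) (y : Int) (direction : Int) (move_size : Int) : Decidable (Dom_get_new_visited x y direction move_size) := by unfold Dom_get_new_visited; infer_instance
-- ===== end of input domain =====

-- B replaces A's four independent coordinate-range comprehensions by one while loop that
-- appends the current point and steps to its one-unit successor (objective: alternative).

-- ===== PORT A =====
def get_new_visited (x : Int) (y : Int) (direction : Int) (move_size : Int) : List (Int × Int) :=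
  if direction == 0 then
    (PySem.List.pyRange y (y - move_size) (-1)).map (fun y_ => (x, y_))
  else if direction == 1 then
    (PySem.List.pyRange x (x - move_size) (-1)).map (fun x_ => (x_, y))
  else if direction == 2 then
    (PySem.List.pyRange y (y + move_size) 1).map (fun y_ => (x, y_))
  else if direction == 3 then
    (PySem.List.pyRange x (x + move_size) 1).map (fun x_ => (x_, y))
  else
    []  -- Python falls through and returns None here; excluded by Pre_get_new_visited

-- ===== PORT B =====
-- _step(px, py, direction): one unit move from (px, py)
def pvStep (px : Int) (py : Int) (direction : Int) : Int × Int :=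
  if direction == 0 then (px, py - 1)
  else if direction == 1 then (px - 1, py)
  else if direction == 2 then (px, py + 1)
  else (px + 1, py)

-- the while loop: append the current point, step to its successor, decrement
def pvWalk (path : List (Int × Int)) (px : Int) (py : Int) (direction : Int)
    (remaining : Int) : List (Int × Int) :=
  if remaining > 0 then
    let p := pvStep px py direction
    pvWalk (path ++ [(px, py)]) p.1 p.2 direction (remaining - 1)
  else path
termination_by remaining.toNat
decreasing_by omega

def get_new_visited_alt (x : Int) (y : Int) (direction : Int) (move_size : Int) : List (Int × Int) :=
  if direction = 0 ∨ direction = 1 ∨ direction = 2 ∨ direction = 3 then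
    pvWalk [] x y direction move_size
  else []  -- Source B returns None here; excluded by Pre_get_new_visited

-- ===== PRECONDITION & SPEC =====
-- Pre_ excludes directions outside {0,1,2,3}: there A falls through every branch and
-- returns None (no value of the declared list type), and B likewise returns None.
def Pre_get_new_visited (x : Int) (y : Int) (direction : Int) (move_size : Int) : Prop :=
  direction = 0 ∨ direction = 1 ∨ direction = 2 ∨ direction = 3
instance (x : Int) (y : Int) (direction : Int) (move_size : Int) : Decidable (Pre_get_new_visited x y direction move_size) := by unfold Pre_get_new_visited; infer_instance

def pvWitness_get_new_visited : Int × Int × Int × Int := (2, -3, 0, 4)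

def Spec_get_new_visited (x : Int) (y : Int) (direction : Int) (move_size : Int) (out : List (Int × Int)) : Prop := out = get_new_visited_alt x y direction move_size
instance (x : Int) (y : Int) (direction : Int) (move_size : Int) (out : List (Int × Int)) : Decidable (Spec_get_new_visited x y direction move_size out) := by unfold Spec_get_new_visited; infer_instance

-- ===== CLAIM =====
def Claim_equal_get_new_visited : Prop := ∀ (x : Int) (y : Int) (direction : Int) (move_size : Int), Dom_get_new_visited x y direction move_size → Pre_get_new_visited x y direction move_size → Spec_get_new_visited x y direction move_size (get_new_visited x y direction move_size)

-- ===== LEMMAS AND PROOFS =====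

theorem pvAlt0 : ∀ (n : Nat) (acc : List (Int × Int)) (x y m : Int), m.toNat = n →
    pvWalk acc x y 0 m = acc ++ (PySem.List.pyRange y (y - m) (-1)).map (fun c => (x, c)) := by
  intro n
  induction n with
  | zero =>
    intro acc x y m hm
    rw [pvWalk]
    simp [show ¬ m > 0 by omega, PySem.List.pyRange_neg_one_eq_nil (by omega : y ≤ y - m)]
  | succ n ih =>
    intro acc x y m hm
    have hpos : m > 0 := by omega
    rw [pvWalk]
    rw [PySem.List.pyRange_neg_one_cons (by omega : y - m < y)]
    simp only [hpos, if_pos, pvStep, List.map_cons]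
    norm_num
    have hih := ih (acc ++ [(x, y)]) x (y - 1) (m - 1) (by omega)
    rw [show y - 1 - (m - 1) = y - m by ring] at hih
    rw [hih]
    simp

theorem pvAlt1 : ∀ (n : Nat) (acc : List (Int × Int)) (x y m : Int), m.toNat = n →
    pvWalk acc x y 1 m = acc ++ (PySem.List.pyRange x (x - m) (-1)).map (fun c => (c, y)) := by
  intro n
  induction n with
  | zero =>
    intro acc x y m hm
    rw [pvWalk]
    simp [show ¬ m > 0 by omega, PySem.List.pyRange_neg_one_eq_nil (by omega : x ≤ x - m)]
  | succ n ih =>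
    intro acc x y m hm
    have hpos : m > 0 := by omega
    rw [pvWalk]
    rw [PySem.List.pyRange_neg_one_cons (by omega : x - m < x)]
    simp only [hpos, if_pos, pvStep, List.map_cons]
    norm_num
    have hih := ih (acc ++ [(x, y)]) (x - 1) y (m - 1) (by omega)
    rw [show x - 1 - (m - 1) = x - m by ring] at hih
    rw [hih]
    simp

theorem pvAlt2 : ∀ (n : Nat) (acc : List (Int × Int)) (x y m : Int), m.toNat = n →
    pvWalk acc x y 2 m = acc ++ (PySem.List.pyRange y (y + m) 1).map (fun c => (x, c)) := by
  intro n
  induction n with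
  | zero =>
    intro acc x y m hm
    rw [pvWalk]
    simp [show ¬ m > 0 by omega, PySem.List.pyRange_one_eq_nil (by omega : y + m ≤ y)]
  | succ n ih =>
    intro acc x y m hm
    have hpos : m > 0 := by omega
    rw [pvWalk]
    rw [PySem.List.pyRange_one_cons (by omega : y < y + m)]
    simp only [hpos, if_pos, pvStep, List.map_cons]
    norm_num
    have hih := ih (acc ++ [(x, y)]) x (y + 1) (m - 1) (by omega)
    rw [show y + 1 + (m - 1) = y + m by ring] at hih
    rw [hih]
    simp

theorem pvAlt3 : ∀ (n : Nat) (acc : List (Int × Int)) (x y m : Int), m.toNat = n →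
    pvWalk acc x y 3 m = acc ++ (PySem.List.pyRange x (x + m) 1).map (fun c => (c, y)) := by
  intro n
  induction n with
  | zero =>
    intro acc x y m hm
    rw [pvWalk]
    simp [show ¬ m > 0 by omega, PySem.List.pyRange_one_eq_nil (by omega : x + m ≤ x)]
  | succ n ih =>
    intro acc x y m hm
    have hpos : m > 0 := by omega
    rw [pvWalk]
    rw [PySem.List.pyRange_one_cons (by omega : x < x + m)]
    simp only [hpos, if_pos, pvStep, List.map_cons]
    norm_num
    have hih := ih (acc ++ [(x, y)]) (x + 1) y (m - 1) (by omega)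
    rw [show x + 1 + (m - 1) = x + m by ring] at hih
    rw [hih]
    simp

-- ===== VERDICT =====
theorem get_new_visited_spec : Claim_equal_get_new_visited := by
  intro x y direction move_size _ hpre
  unfold Spec_get_new_visited get_new_visited get_new_visited_alt
  rcases hpre with h | h | h | h <;> subst h <;> norm_num
  · rw [pvAlt0 move_size.toNat [] x y move_size rfl]; simp
  · rw [pvAlt1 move_size.toNat [] x y move_size rfl]; simp
  · rw [pvAlt2 move_size.toNat [] x y move_size rfl]; simp
  · rw [pvAlt3 move_size.toNat [] x y move_size rfl]; simp
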